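-- pv_equiv track=rewrite | github.com/Gabrielsilva090/Homework-Codes | pratique python/juvenal_nao_confia.py | contador_destruidos
-- ===== SOURCE A (Python) =====
-- def contador_destruidos(tabuleiro, disparos): #contagem de navios destruidos
--     def eh_valido(linha, coluna): #função para verificar se a posição é valida
--         return 0 <= linha < len(tabuleiro) and 0 <= coluna < len(tabuleiro[0])
--
--     def anda_tabuleiro(linha, coluna):  #função para andar pelo tabuleiro
--         if not eh_valido(linha, coluna) or tabuleiro[linha][coluna] == '.': #verifica se a posição é valida e se é um navio
--             return
--         tabuleiro[linha][coluna] = '.'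
--         direcoes = [(0, 1), (0, -1), (1, 0), (-1, 0)]
--         for dl, dc in direcoes:
--             anda_tabuleiro(linha + dl, coluna + dc)
--
--     navios_destruidos = 0
--     for disparo in disparos:
--         linha, coluna = disparo
--         if tabuleiro[linha - 1][coluna - 1] == '#':
--             navios_destruidos += 1
--             anda_tabuleiro(linha - 1, coluna - 1)
--
--     return navios_destruidos
-- ===== SOURCE B (Python) =====
-- def contador_destruidos(tabuleiro, disparos):
--     # Iterative flood-fill with an explicit stack instead of A's recursion.
--     # Mutates tabuleiro in place exactly like A (ship cells become '.').
--     linhas = len(tabuleiro)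
--     colunas = len(tabuleiro[0]) if tabuleiro else 0
--     navios_destruidos = 0
--     for linha, coluna in disparos:
--         if tabuleiro[linha - 1][coluna - 1] == '#':
--             navios_destruidos += 1
--             pilha = [(linha - 1, coluna - 1)]
--             while pilha:
--                 l, c = pilha.pop()
--                 if 0 <= l < linhas and 0 <= c < colunas and tabuleiro[l][c] != '.':
--                     tabuleiro[l][c] = '.'
--                     for dl, dc in ((-1, 0), (1, 0), (0, -1), (0, 1)):
--                         pilha.append((l + dl, c + dc))
--     return navios_destruidos
-- ===== Notes on version B (the rewrite author's own statement) =====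
-- stated objective: alternative
-- what changed: A's recursive flood-fill (anda_tabuleiro calling itself on the four neighbours) is replaced by an iterative flood-fill with an explicit stack: pop a cell, skip it if out of bounds or already '.', else mark it and push its four neighbours; the outer loop over disparos and all checks are unchanged, and the same in-place board mutation is performed.
-- outside the precondition, e.g. on contador_destruidos([['#', '.'], ['.']], [(1, 1)]): A returns 1, B returns 1
import Mathlib
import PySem

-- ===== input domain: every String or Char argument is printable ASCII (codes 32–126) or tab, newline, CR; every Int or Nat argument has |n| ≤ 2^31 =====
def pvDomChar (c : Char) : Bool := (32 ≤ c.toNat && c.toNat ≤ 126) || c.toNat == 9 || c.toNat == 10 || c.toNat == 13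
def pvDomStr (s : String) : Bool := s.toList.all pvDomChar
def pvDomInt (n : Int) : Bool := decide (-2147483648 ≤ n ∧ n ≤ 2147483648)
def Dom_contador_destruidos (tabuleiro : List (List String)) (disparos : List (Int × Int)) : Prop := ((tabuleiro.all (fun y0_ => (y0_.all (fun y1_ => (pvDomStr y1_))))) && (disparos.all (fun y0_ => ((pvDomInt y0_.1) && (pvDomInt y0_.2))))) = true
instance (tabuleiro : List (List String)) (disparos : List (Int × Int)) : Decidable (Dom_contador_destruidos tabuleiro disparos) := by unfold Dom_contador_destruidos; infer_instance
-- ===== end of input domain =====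

-- B replaces A's recursive flood-fill by an explicit-stack iteration (same outer loop,
-- same checks, same board mutation of `tabuleiro`); equivalence is about the return value.

-- number of cells that are not "." (termination measure for both flood fills)
def pvNonDot (tab : List (List String)) : Nat :=
  (tab.map (fun row => row.countP (fun s => s != "."))).sum

-- functional board update tabuleiro[i][j] = "."
def pvMark (tab : List (List String)) (i j : Nat) : List (List String) :=
  tab.set i ((tab.getD i []).set j ".")

-- ===== PORT A =====
def pvEhValido (tab : List (List String)) (l c : Int) : Bool :=
  decide (0 ≤ l) && decide (l < (tab.length : Int)) &&
  decide (0 ≤ c) && decide (c < (((tab.headD []).length : Nat) : Int))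

-- A's recursive anda_tabuleiro; `fuel` only makes the recursion total in Lean
-- (fuel = pvNonDot+1 at the call site always suffices: each level of recursion depth
-- past a mark is on a board with one fewer non-"." cell).  The cell read is exact
-- under Pre_ (rectangular board); on a ragged board Python raises IndexError there.
def pvAndaF : Nat → List (List String) → Int → Int → List (List String)
  | 0, tab, _, _ => tab
  | f + 1, tab, l, c =>
    if !(pvEhValido tab l c) || (tab.getD l.toNat []).getD c.toNat "" == "." then tab
    else
      pvAndaF f (pvAndaF f (pvAndaF f (pvAndaF f
        (pvMark tab l.toNat c.toNat) l (c + 1)) l (c - 1)) (l + 1) c) (l - 1) c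

def pvPassoA (st : List (List String) × Int) (d : Int × Int) : List (List String) × Int :=
  match (PySem.List.pyGet? st.1 (d.1 - 1)).bind (fun row => PySem.List.pyGet? row (d.2 - 1)) with
  | some s => if s = "#" then (pvAndaF (pvNonDot st.1 + 1) st.1 (d.1 - 1) (d.2 - 1), st.2 + 1) else st
  | none => st   -- Python raises IndexError here (excluded by Pre_)

def contador_destruidos (tabuleiro : List (List String)) (disparos : List (Int × Int)) : Int :=
  (disparos.foldl pvPassoA (tabuleiro, 0)).2

-- ===== PORT B =====
-- strict decrease of the measure when a real cell ≠ "." is marked (needed for termination)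
theorem pvCountP_set_lt (row : List String) (j : Nat) (s : String)
    (hs : row[j]? = some s) (hne : s ≠ ".") :
    (row.set j ".").countP (fun t => t != ".") < row.countP (fun t => t != ".") := by
  induction row generalizing j with
  | nil => simp at hs
  | cons a t ih =>
    cases j with
    | zero =>
      simp at hs; subst hs
      simp [hne]
    | succ j =>
      simp at hs
      have := ih j hs
      simp [List.countP_cons]
      omega

theorem pvNonDot_set (tab : List (List String)) (i : Nat) (row row' : List String)
    (hrow : tab[i]? = some row) :
    pvNonDot (tab.set i row') + row.countP (fun t => t != ".") =
      pvNonDot tab + row'.countP (fun t => t != ".") := by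
  induction tab generalizing i with
  | nil => simp at hrow
  | cons a t ih =>
    cases i with
    | zero => simp at hrow; subst hrow; simp [pvNonDot]; omega
    | succ i =>
      simp at hrow
      have := ih i hrow
      simp [pvNonDot] at this ⊢
      omega

theorem pvNonDot_mark_lt (tab : List (List String)) (i j : Nat) (row : List String) (s : String)
    (hrow : tab[i]? = some row) (hs : row[j]? = some s) (hne : s ≠ ".") :
    pvNonDot (pvMark tab i j) < pvNonDot tab := by
  have hgetD : tab.getD i [] = row := by
    simp [List.getD, hrow]
  have h1 := pvNonDot_set tab i row (row.set j ".") hrow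
  have h2 := pvCountP_set_lt row j s hs hne
  unfold pvMark
  rw [hgetD]
  omega

-- B's iterative flood fill: pop a cell, skip it if out of bounds or ".", else mark it
-- and push the four neighbours.  The two `none` branches correspond to Python's
-- IndexError on a ragged board (excluded by Pre_); they only make the recursion total.
def pvStackLoop (linhas colunas : Nat) (tab : List (List String)) :
    List (Int × Int) → List (List String)
  | [] => tab
  | (l, c) :: pilha =>
    if _hb : 0 ≤ l ∧ l < (linhas : Int) ∧ 0 ≤ c ∧ c < (colunas : Int) then
      match _h1 : tab[l.toNat]? with
      | none => tab
      | some row =>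
        match _h2 : row[c.toNat]? with
        | none => tab
        | some cell =>
          if cell = "." then pvStackLoop linhas colunas tab pilha
          else pvStackLoop linhas colunas (pvMark tab l.toNat c.toNat)
                 ((l, c + 1) :: (l, c - 1) :: (l + 1, c) :: (l - 1, c) :: pilha)
    else pvStackLoop linhas colunas tab pilha
termination_by pilha => (pvNonDot tab, pilha.length)
decreasing_by
  · exact Prod.Lex.right _ (by simp)
  · exact Prod.Lex.left _ _ (pvNonDot_mark_lt tab _ _ _ _ _h1 _h2 (by assumption))
  · exact Prod.Lex.right _ (by simp)

def pvPassoB (linhas colunas : Nat) (st : List (List String) × Int) (d : Int × Int) :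
    List (List String) × Int :=
  match (PySem.List.pyGet? st.1 (d.1 - 1)).bind (fun row => PySem.List.pyGet? row (d.2 - 1)) with
  | some s => if s = "#" then (pvStackLoop linhas colunas st.1 [(d.1 - 1, d.2 - 1)], st.2 + 1) else st
  | none => st   -- Python raises IndexError here (excluded by Pre_)

def contador_destruidos_alt (tabuleiro : List (List String)) (disparos : List (Int × Int)) : Int :=
  let linhas := tabuleiro.length
  let colunas := if tabuleiro.isEmpty then 0 else (tabuleiro.headD []).length
  (disparos.foldl (pvPassoB linhas colunas) (tabuleiro, 0)).2

-- ===== PRECONDITION & SPEC =====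
-- Pre_ excludes the inputs on which Python A raises IndexError: a shot index outside
-- Python's range for the board, and (when there are shots) non-rectangular boards —
-- whether raggedness actually raises depends on flood-fill reachability, which is not a
-- closed-form condition, so all ragged boards with shots are excluded; on some of them
-- A still returns (and B returns the same value).
def Pre_contador_destruidos (tabuleiro : List (List String)) (disparos : List (Int × Int)) : Prop :=
  (disparos ≠ [] → ∀ row ∈ tabuleiro, row.length = (tabuleiro.headD []).length) ∧
  ∀ d ∈ disparos,
    (-(tabuleiro.length : Int) ≤ d.1 - 1 ∧ d.1 - 1 < (tabuleiro.length : Int)) ∧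
    (-(((tabuleiro.headD []).length : Nat) : Int) ≤ d.2 - 1 ∧
      d.2 - 1 < (((tabuleiro.headD []).length : Nat) : Int))
instance (tabuleiro : List (List String)) (disparos : List (Int × Int)) : Decidable (Pre_contador_destruidos tabuleiro disparos) := by unfold Pre_contador_destruidos; infer_instance

def pvWitness_contador_destruidos : List (List String) × (List (Int × Int)) :=
  ([["#", "."], [".", "#"]], [(1, 1), (2, 2)])

def Spec_contador_destruidos (tabuleiro : List (List String)) (disparos : List (Int × Int)) (out : Int) : Prop := out = contador_destruidos_alt tabuleiro disparos
instance (tabuleiro : List (List String)) (disparos : List (Int × Int)) (out : Int) : Decidable (Spec_contador_destruidos tabuleiro disparos out) := by unfold Spec_contador_destruidos; infer_instance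

-- ===== CLAIM (what is proved, stated in full; the proofs are below) =====
def Claim_equal_contador_destruidos : Prop := ∀ (tabuleiro : List (List String)) (disparos : List (Int × Int)), Dom_contador_destruidos tabuleiro disparos → Pre_contador_destruidos tabuleiro disparos → Spec_contador_destruidos tabuleiro disparos (contador_destruidos tabuleiro disparos)

-- ===== LEMMAS AND PROOFS =====


theorem pvCountP_set_le (row : List String) (j : Nat) :
    (row.set j ".").countP (fun t => t != ".") ≤ row.countP (fun t => t != ".") := by
  induction row generalizing j with
  | nil => simp
  | cons a t ih =>
    cases j with
    | zero => simp [List.countP_cons]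
    | succ j => have := ih j; simp [List.countP_cons]; omega

theorem pvNonDot_mark_le (tab : List (List String)) (i j : Nat) :
    pvNonDot (pvMark tab i j) ≤ pvNonDot tab := by
  by_cases hi : i < tab.length
  · have hrow : tab[i]? = some tab[i] := List.getElem?_eq_getElem hi
    have h1 := pvNonDot_set tab i tab[i] ((tab.getD i []).set j ".") hrow
    have hgetD : tab.getD i [] = tab[i] := by simp [List.getD_eq_getElem?_getD, hrow]
    have h2 := pvCountP_set_le tab[i] j
    unfold pvMark
    rw [hgetD] at h1 ⊢
    omega
  · unfold pvMark
    rw [List.set_eq_of_length_le (by omega)]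

theorem pvMark_length (tab : List (List String)) (i j : Nat) :
    (pvMark tab i j).length = tab.length := by simp [pvMark]

theorem pvMark_rect (tab : List (List String)) (i j : Nat) (C : Nat)
    (h : ∀ row ∈ tab, row.length = C) : ∀ row ∈ pvMark tab i j, row.length = C := by
  intro row hr
  by_cases hi : i < tab.length
  · rcases List.mem_or_eq_of_mem_set hr with h' | h'
    · exact h row h'
    · subst h'
      have hrow : tab[i]? = some tab[i] := List.getElem?_eq_getElem hi
      have hgetD : tab.getD i [] = tab[i] := by simp [List.getD_eq_getElem?_getD, hrow]
      rw [hgetD, List.length_set]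
      exact h _ (List.getElem_mem hi)
  · unfold pvMark at hr
    rw [List.set_eq_of_length_le (by omega)] at hr
    exact h row hr

theorem pvAndaF_inv (f : Nat) : ∀ (tab : List (List String)) (l c : Int),
    (pvAndaF f tab l c).length = tab.length ∧
    pvNonDot (pvAndaF f tab l c) ≤ pvNonDot tab ∧
    ∀ C : Nat, (∀ row ∈ tab, row.length = C) → ∀ row ∈ pvAndaF f tab l c, row.length = C := by
  induction f with
  | zero => intro tab l c; simp [pvAndaF]
  | succ f ih =>
    intro tab l c
    rw [pvAndaF]
    split
    · simp
    · obtain ⟨m1, m2, m3⟩ := ih (pvMark tab l.toNat c.toNat) l (c + 1)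
      obtain ⟨n1, n2, n3⟩ := ih _ l (c - 1)
      obtain ⟨o1, o2, o3⟩ := ih _ (l + 1) c
      obtain ⟨p1, p2, p3⟩ := ih _ (l - 1) c
      refine ⟨?_, ?_, ?_⟩
      · rw [p1, o1, n1, m1, pvMark_length]
      · have := pvNonDot_mark_le tab l.toNat c.toNat
        omega
      · intro C hC
        exact p3 C (o3 C (n3 C (m3 C (pvMark_rect tab _ _ C hC))))

theorem pvEhValido_iff (tab : List (List String)) (R C : Nat) (l c : Int)
    (hR : tab.length = R) (hC : ∀ row ∈ tab, row.length = C) :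
    pvEhValido tab l c = true ↔ (0 ≤ l ∧ l < (R : Int) ∧ 0 ≤ c ∧ c < (C : Int)) := by
  unfold pvEhValido
  cases tab with
  | nil =>
    simp at hR
    subst hR
    simp
    omega
  | cons a t =>
    have ha : a.length = C := hC a (List.mem_cons_self)
    simp [List.headD, ha, ← hR]
    tauto



theorem pvStackLoop_nil (R C : Nat) (tab : List (List String)) :
    pvStackLoop R C tab [] = tab := by rw [pvStackLoop]

theorem pvStackLoop_skip (R C : Nat) (tab : List (List String)) (l c : Int)
    (p : List (Int × Int)) (hb : ¬ (0 ≤ l ∧ l < (R : Int) ∧ 0 ≤ c ∧ c < (C : Int))) :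
    pvStackLoop R C tab ((l, c) :: p) = pvStackLoop R C tab p := by
  rw [pvStackLoop, dif_neg hb]

theorem pvStackLoop_dot (R C : Nat) (tab : List (List String)) (l c : Int)
    (p : List (Int × Int)) (row : List String)
    (hb : 0 ≤ l ∧ l < (R : Int) ∧ 0 ≤ c ∧ c < (C : Int))
    (hrow : tab[l.toNat]? = some row) (hcell : row[c.toNat]? = some ".") :
    pvStackLoop R C tab ((l, c) :: p) = pvStackLoop R C tab p := by
  rw [pvStackLoop, dif_pos hb]
  split
  · simp_all
  · next row' h1 =>
    rw [hrow] at h1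
    cases h1
    split
    · simp_all
    · next cell h2 =>
      rw [hcell] at h2
      cases h2
      simp

theorem pvStackLoop_mark (R C : Nat) (tab : List (List String)) (l c : Int)
    (p : List (Int × Int)) (row : List String) (cell : String)
    (hb : 0 ≤ l ∧ l < (R : Int) ∧ 0 ≤ c ∧ c < (C : Int))
    (hrow : tab[l.toNat]? = some row) (hcell : row[c.toNat]? = some cell) (hne : cell ≠ ".") :
    pvStackLoop R C tab ((l, c) :: p) =
      pvStackLoop R C (pvMark tab l.toNat c.toNat)
        ((l, c + 1) :: (l, c - 1) :: (l + 1, c) :: (l - 1, c) :: p) := by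
  rw [pvStackLoop, dif_pos hb]
  split
  · simp_all
  · next row' h1 =>
    rw [hrow] at h1
    cases h1
    split
    · simp_all
    · next cell' h2 =>
      rw [hcell] at h2
      cases h2
      rw [if_neg hne]

theorem pvSim : ∀ (n : Nat) (tab : List (List String)), pvNonDot tab = n →
    ∀ (R C : Nat), tab.length = R → (∀ row ∈ tab, row.length = C) →
    ∀ (l c : Int) (pilha : List (Int × Int)) (f : Nat), n < f →
    pvStackLoop R C tab ((l, c) :: pilha) = pvStackLoop R C (pvAndaF f tab l c) pilha := by
  intro n
  induction n using Nat.strong_induction_on with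
  | _ n IH =>
    intro tab hn R C hR hC l c pilha f hf
    cases f with
    | zero => omega
    | succ f =>
      rw [pvAndaF]
      by_cases hv : pvEhValido tab l c = true
      · have hb : 0 ≤ l ∧ l < (R : Int) ∧ 0 ≤ c ∧ c < (C : Int) :=
          (pvEhValido_iff tab R C l c hR hC).mp hv
        have hl : l.toNat < tab.length := by omega
        have hrow : tab[l.toNat]? = some tab[l.toNat] := List.getElem?_eq_getElem hl
        have hrl : tab[l.toNat].length = C := hC _ (List.getElem_mem hl)
        have hcn : c.toNat < tab[l.toNat].length := by omega
        have hcell : tab[l.toNat][c.toNat]? = some tab[l.toNat][c.toNat] :=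
          List.getElem?_eq_getElem hcn
        have hg1 : tab.getD l.toNat [] = tab[l.toNat] := by
          simp [List.getD_eq_getElem?_getD, hrow]
        have hg2 : tab[l.toNat].getD c.toNat "" = tab[l.toNat][c.toNat] := by
          simp [List.getD_eq_getElem?_getD, hcell]
        rw [hg1, hg2]
        by_cases hdot : tab[l.toNat][c.toNat] = "."
        · rw [pvStackLoop_dot R C tab l c pilha tab[l.toNat] hb hrow (hdot ▸ hcell)]
          rw [if_pos (by simp [hv, hdot])]
        · rw [if_neg (by simp [hv, hdot])]
          rw [pvStackLoop_mark R C tab l c pilha tab[l.toNat] tab[l.toNat][c.toNat] hb hrow hcell hdot]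
          have hmlt : pvNonDot (pvMark tab l.toNat c.toNat) < n :=
            hn ▸ pvNonDot_mark_lt tab l.toNat c.toNat tab[l.toNat] tab[l.toNat][c.toNat] hrow hcell hdot
          have hmR : (pvMark tab l.toNat c.toNat).length = R := by rw [pvMark_length]; exact hR
          have hmC := pvMark_rect tab l.toNat c.toNat C hC
          obtain ⟨i11, i12, i13⟩ := pvAndaF_inv f (pvMark tab l.toNat c.toNat) l (c + 1)
          rw [IH _ hmlt (pvMark tab l.toNat c.toNat) rfl R C hmR hmC l (c + 1) _ f (by omega)]
          obtain ⟨i21, i22, i23⟩ := pvAndaF_inv f (pvAndaF f (pvMark tab l.toNat c.toNat) l (c + 1)) l (c - 1)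
          rw [IH _ (by omega) (pvAndaF f (pvMark tab l.toNat c.toNat) l (c + 1)) rfl R C
              (by rw [i11]; exact hmR) (i13 C hmC) l (c - 1) _ f (by omega)]
          obtain ⟨i31, i32, i33⟩ := pvAndaF_inv f (pvAndaF f (pvAndaF f (pvMark tab l.toNat c.toNat) l (c + 1)) l (c - 1)) (l + 1) c
          rw [IH _ (by omega) (pvAndaF f (pvAndaF f (pvMark tab l.toNat c.toNat) l (c + 1)) l (c - 1)) rfl R C
              (by rw [i21, i11]; exact hmR) (i23 C (i13 C hmC)) (l + 1) c _ f (by omega)]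
          rw [IH _ (by omega) (pvAndaF f (pvAndaF f (pvAndaF f (pvMark tab l.toNat c.toNat) l (c + 1)) l (c - 1)) (l + 1) c) rfl R C
              (by rw [i31, i21, i11]; exact hmR) (i33 C (i23 C (i13 C hmC))) (l - 1) c _ f (by omega)]
      · rw [pvStackLoop_skip R C tab l c pilha
            (fun h => hv ((pvEhValido_iff tab R C l c hR hC).mpr h))]
        rw [if_pos (by simp [hv])]

theorem pvFold (R C : Nat) : ∀ (disparos : List (Int × Int)) (tab : List (List String)) (cnt : Int),
    tab.length = R → (∀ row ∈ tab, row.length = C) →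
    disparos.foldl pvPassoA (tab, cnt) = disparos.foldl (pvPassoB R C) (tab, cnt) := by
  intro disparos
  induction disparos with
  | nil => intro tab cnt _ _; rfl
  | cons d ds ih =>
    intro tab cnt hR hC
    have hstep : pvPassoA (tab, cnt) d = pvPassoB R C (tab, cnt) d ∧
        (pvPassoA (tab, cnt) d).1.length = R ∧
        (∀ row ∈ (pvPassoA (tab, cnt) d).1, row.length = C) := by
      unfold pvPassoA pvPassoB
      cases hm : (PySem.List.pyGet? tab (d.1 - 1)).bind (fun row => PySem.List.pyGet? row (d.2 - 1)) with
      | none => exact ⟨rfl, hR, hC⟩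
      | some s =>
        by_cases hs : s = "#"
        · simp only [hs, if_pos]
          obtain ⟨a1, a2, a3⟩ := pvAndaF_inv (pvNonDot tab + 1) tab (d.1 - 1) (d.2 - 1)
          refine ⟨?_, by simpa using (a1.trans hR), by simpa using a3 C hC⟩
          have := pvSim (pvNonDot tab) tab rfl R C hR hC (d.1 - 1) (d.2 - 1) [] (pvNonDot tab + 1) (by omega)
          rw [pvStackLoop_nil] at this
          simp [this]
        · simp [hs]
          exact ⟨hR, hC⟩
    rw [List.foldl_cons, List.foldl_cons, hstep.1]
    rcases hp : pvPassoB R C (tab, cnt) d with ⟨tab2, cnt2⟩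
    have h2 := hstep.2
    rw [hstep.1, hp] at h2
    exact ih tab2 cnt2 h2.1 h2.2

-- ===== VERDICT (by name: the statement is the Claim_ definition above) =====
theorem contador_destruidos_spec : Claim_equal_contador_destruidos := by
  intro tabuleiro disparos _ hpre
  unfold Spec_contador_destruidos
  cases disparos with
  | nil => rfl
  | cons d ds =>
    have hC : ∀ row ∈ tabuleiro, row.length = (tabuleiro.headD []).length :=
      hpre.1 (by simp)
    unfold contador_destruidos contador_destruidos_alt
    have hcol : (if tabuleiro.isEmpty then 0 else (tabuleiro.headD []).length) =
        (tabuleiro.headD []).length := by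
      cases tabuleiro <;> simp
    rw [hcol]
    rw [pvFold tabuleiro.length (tabuleiro.headD []).length (d :: ds) tabuleiro 0 rfl hC]
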